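-- pv_equiv track=rewrite | github.com/AVUKU-PRAGATHESWARI/GeeksForGeeks | String with numbers at its end.py | isSame
-- ===== SOURCE A (Python) =====
-- def isSame(s):
--     boundpoint=0
--     for i in s[::-1]:
--         if i.isdigit():
--             boundpoint+=1
--         else:
--             break
--     length=len(s)-boundpoint
--     number=int(s[(len(s)-boundpoint):len(s)])
--     if(length==number):
--         return 1
--     else:
--         return 0
-- ===== SOURCE B (Python) =====
-- def isSame(s):
--     # One forward pass: k ends as 1 + index of the last non-digit character
--     # (0 if every character is a digit), i.e. the start of the trailing digit run.
--     k = 0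
--     for i, c in enumerate(s):
--         if not c.isdigit():
--             k = i + 1
--     return 1 if k == int(s[k:]) else 0
-- ===== Notes on version B (the rewrite author's own statement) =====
-- stated objective: simpler
-- what changed: B replaces A's reversed break-scan plus len-arithmetic slice with one forward enumerate pass that tracks 1 + the index of the last non-digit, then compares that boundary with int(s[k:]).
import Mathlib
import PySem

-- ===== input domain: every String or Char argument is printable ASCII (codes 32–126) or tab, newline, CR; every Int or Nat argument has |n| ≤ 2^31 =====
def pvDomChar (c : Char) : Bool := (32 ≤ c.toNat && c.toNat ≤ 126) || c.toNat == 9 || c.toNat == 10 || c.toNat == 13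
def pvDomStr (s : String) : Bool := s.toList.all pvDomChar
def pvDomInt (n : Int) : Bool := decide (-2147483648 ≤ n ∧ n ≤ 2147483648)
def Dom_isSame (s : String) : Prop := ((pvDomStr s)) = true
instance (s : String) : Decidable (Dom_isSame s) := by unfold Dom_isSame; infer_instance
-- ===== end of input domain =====

-- B does the same O(n) work in one forward pass (simpler); equivalence of return values is proved on Pre_ (strings with at least one trailing digit, exactly where A's int() does not raise).

-- ===== PORT A =====
-- 'for i in s[::-1]: if i.isdigit(): boundpoint += 1 else: break' — count of the leading digits of the reversed string
def pvCountA : List Char → Int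
  | [] => 0
  | c :: rest => if PySem.Chars.isdigit c then pvCountA rest + 1 else 0

def isSame (s : String) : Int :=
  let boundpoint := pvCountA s.toList.reverse
  let length := PySem.Str.len s - boundpoint
  -- int(s[(len(s)-boundpoint):len(s)]); none = ValueError (excluded by Pre_)
  match PySem.Int.ofChars? (PySem.List.slice s.toList (some (PySem.Str.len s - boundpoint)) (some (PySem.Str.len s))) with
  | none => 0
  | some number => if length = number then 1 else 0

-- ===== PORT B =====
def isSame_alt (s : String) : Int :=
  -- for i, c in enumerate(s): if not c.isdigit(): k = i + 1
  let k := (PySem.List.enumerate s.toList 0).foldl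
    (fun k (p : Int × Char) => if ¬ (PySem.Chars.isdigit p.2) then p.1 + 1 else k) 0
  -- int(s[k:]); none = ValueError (excluded by Pre_)
  match PySem.Int.ofChars? (PySem.List.slice s.toList (some k) none) with
  | none => 0
  | some number => if k = number then 1 else 0

-- ===== PRECONDITION & SPEC =====
-- Pre_ excludes exactly the inputs where A raises ValueError (no trailing digit to parse; B raises there too; both ports return 0 there, so the equality even holds without Pre_, but the Python programs raise).
def Pre_isSame (s : String) : Prop := (s.toList.getLast?.elim false PySem.Chars.isdigit) = true
instance (s : String) : Decidable (Pre_isSame s) := by unfold Pre_isSame; infer_instance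

def pvWitness_isSame : String := "ab2"

def Spec_isSame (s : String) (out : Int) : Prop := out = isSame_alt s
instance (s : String) (out : Int) : Decidable (Spec_isSame s out) := by unfold Spec_isSame; infer_instance

-- ===== CLAIM (what is proved, stated in full; the proofs are below) =====
def Claim_equal_isSame : Prop := ∀ (s : String), Dom_isSame s → Pre_isSame s → Spec_isSame s (isSame s)

-- ===== LEMMAS AND PROOFS =====

theorem pvCountA_nonneg (l : List Char) : 0 ≤ pvCountA l := by
  induction l with
  | nil => simp [pvCountA]
  | cons c r ih => simp only [pvCountA]; split <;> omega

theorem pvCountA_le_length (l : List Char) : pvCountA l ≤ l.length := by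
  induction l with
  | nil => simp [pvCountA]
  | cons c r ih => simp only [pvCountA, List.length_cons]; split <;> push_cast <;> omega

-- B's forward boundary equals A's len(s) - boundpoint
theorem pvBoundary_eq (l : List Char) :
    (PySem.List.enumerate l 0).foldl
      (fun k (p : Int × Char) => if ¬ (PySem.Chars.isdigit p.2) then p.1 + 1 else k) 0
      = (l.length : Int) - pvCountA l.reverse := by
  induction l using List.reverseRecOn with
  | nil => simp [PySem.List.enumerate, pvCountA]
  | append_singleton l' c ih =>
    rw [PySem.List.enumerate_append, List.foldl_append, ih]
    simp only [PySem.List.enumerate_cons, PySem.List.enumerate_nil, List.foldl_cons,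
      List.foldl_nil, List.reverse_append, List.reverse_singleton, List.singleton_append,
      pvCountA, List.length_append, List.length_singleton]
    split_ifs <;> push_cast <;> omega

theorem isSame_eq_alt (s : String) : isSame s = isSame_alt s := by
  have hle := pvCountA_le_length s.toList.reverse
  have hnn := pvCountA_nonneg s.toList.reverse
  rw [List.length_reverse] at hle
  have h0 : (0:Int) ≤ (s.toList.length : Int) - pvCountA s.toList.reverse := by omega
  have hslice : PySem.List.slice s.toList
      (some ((s.toList.length : Int) - pvCountA s.toList.reverse))
      (some ((s.toList.length : Int))) =
      PySem.List.slice s.toList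
      (some ((s.toList.length : Int) - pvCountA s.toList.reverse)) none := by
    rw [PySem.List.slice_toNat _ h0 (by positivity), PySem.List.slice_from _ h0]
    apply List.take_of_length_le
    simp
  simp only [isSame, isSame_alt, PySem.Str.len_eq, pvBoundary_eq, hslice]
  rfl

-- ===== VERDICT (by name: the statement is the Claim_ definition above) =====
theorem isSame_spec : Claim_equal_isSame := by
  intro s _ _
  unfold Spec_isSame
  exact isSame_eq_alt s
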